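-- pv_equiv track=rewrite | github.com/whatIfTechnologies/mubes-ubem | ModelerFolder/TestOptimUpperTower.py | grabParametersnew
-- ===== SOURCE A (Python) =====
-- def grabParametersnew(x):
--     nbBase = int(len(x) / 5)
--     param = {}
--     for base in range(nbBase):
--         param[base] = {}
--         param[base]['height'] = x[0+5*base]
--         param[base]['area'] = x[1+5*base]
--         param[base]['shapeF'] = x[2+5*base]
--         param[base]['angle'] = x[3+5*base]
--         param[base]['loc'] = x[4+5*base]
--     return param
-- ===== SOURCE B (Python) =====
-- def grabParametersnew(x):
--     keys = ['height', 'area', 'shapeF', 'angle', 'loc']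
--     grp = zip(*[iter(x)] * 5)
--     return {base: dict(zip(keys, chunk)) for base, chunk in enumerate(grp)}
-- ===== Notes on version B (the rewrite author's own statement) =====
-- stated objective: idiomatic
-- what changed: Replaces the range(nbBase) loop with 5*base+k index arithmetic by the zip(*[iter(x)]*5) chunking idiom: consecutive 5-tuples are paired with the key list via zip in a dict comprehension, so no index offsets are computed.
import Mathlib
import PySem

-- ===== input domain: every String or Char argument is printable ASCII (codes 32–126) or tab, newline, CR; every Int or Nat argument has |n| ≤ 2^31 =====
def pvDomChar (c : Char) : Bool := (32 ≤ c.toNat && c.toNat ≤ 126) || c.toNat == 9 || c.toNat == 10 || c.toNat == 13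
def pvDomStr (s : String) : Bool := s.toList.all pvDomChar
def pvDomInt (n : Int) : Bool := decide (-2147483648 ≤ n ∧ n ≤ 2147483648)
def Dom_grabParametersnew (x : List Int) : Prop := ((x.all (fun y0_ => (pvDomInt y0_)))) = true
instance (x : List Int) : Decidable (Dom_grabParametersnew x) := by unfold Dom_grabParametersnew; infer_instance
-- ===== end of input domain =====

-- B replaces A's index-arithmetic loop by consuming the list in consecutive chunks of five
-- (the zip(*[iter(x)]*5) idiom); objective: idiomatic. Return values proved equal; no mutation.
-- ===== PORT A =====
def grabParametersnew (x : List Int) : List (Int × List (String × Int)) :=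
  let nbBase : Int := PySem.Int.truncdiv (PySem.List.len x) 5
  let param : PySem.Dict Int (PySem.Dict String Int) :=
    (PySem.List.pyRange 0 nbBase 1).foldl (fun param base =>
      let d : PySem.Dict String Int := PySem.Dict.empty
      let d := d.insert "height" (PySem.List.pyGetD x (0 + 5 * base) 0)
      let d := d.insert "area"   (PySem.List.pyGetD x (1 + 5 * base) 0)
      let d := d.insert "shapeF" (PySem.List.pyGetD x (2 + 5 * base) 0)
      let d := d.insert "angle"  (PySem.List.pyGetD x (3 + 5 * base) 0)
      let d := d.insert "loc"    (PySem.List.pyGetD x (4 + 5 * base) 0)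
      param.insert base d) PySem.Dict.empty
  param.items.map (fun p => (p.1, p.2.items))

-- ===== PORT B =====
-- grp = zip(*[iter(x)]*5): consecutive 5-chunks; each chunk zipped with the key list.
def pvChunks5 (i : Int) : List Int → List (Int × List (String × Int))
  | h :: a :: s :: g :: l :: rest =>
      (i, [("height", h), ("area", a), ("shapeF", s), ("angle", g), ("loc", l)])
        :: pvChunks5 (i + 1) rest
  | _ => []

def grabParametersnew_alt (x : List Int) : List (Int × List (String × Int)) :=
  pvChunks5 0 x

-- ===== PRECONDITION & SPEC =====
def Spec_grabParametersnew (x : List Int) (out : List (Int × List (String × Int))) : Prop := out = grabParametersnew_alt x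
instance (x : List Int) (out : List (Int × List (String × Int))) : Decidable (Spec_grabParametersnew x out) := by unfold Spec_grabParametersnew; infer_instance

-- ===== CLAIM (what is proved, stated in full; the proofs are below) =====
def Claim_equal_grabParametersnew : Prop := ∀ (x : List Int), Dom_grabParametersnew x → Spec_grabParametersnew x (grabParametersnew x)

-- ===== LEMMAS AND PROOFS =====

-- A's row for block j, with Nat indices
def pvRow (x : List Int) (j : Nat) : List (String × Int) :=
  [("height", x.getD (5 * j) 0), ("area", x.getD (5 * j + 1) 0),
   ("shapeF", x.getD (5 * j + 2) 0), ("angle", x.getD (5 * j + 3) 0),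
   ("loc", x.getD (5 * j + 4) 0)]

lemma pvChunks5_eq_map (i : Int) (x : List Int) :
    pvChunks5 i x = (List.range (x.length / 5)).map (fun (j : Nat) => ((i + j : Int), pvRow x j)) := by
  induction i, x using pvChunks5.induct with
  | case1 i h a s g l rest ih =>
      have hlen : (h :: a :: s :: g :: l :: rest).length / 5 = rest.length / 5 + 1 := by
        simp [List.length_cons]; omega
      rw [pvChunks5, hlen, List.range_succ_eq_map]
      rw [ih]
      simp only [List.map_cons, List.map_map]
      refine List.cons_eq_cons.mpr ⟨by simp [pvRow], ?_⟩
      apply List.map_congr_left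
      intro j _
      simp only [Function.comp]
      refine Prod.ext ?_ ?_
      · push_cast; ring
      · have e0 : 5 * (j + 1) = 5 * j + 1 + 1 + 1 + 1 + 1 := by omega
        simp [pvRow, e0]
  | case2 ys i hys =>
      have h0 : ys.length / 5 = 0 := by
        by_contra hne
        have h5 : 5 ≤ ys.length := by omega
        match ys, h5 with
        | y1 :: y2 :: y3 :: y4 :: y5 :: t, _ => exact hys y1 y2 y3 y4 y5 t rfl
      rw [h0]
      match ys, hys with
      | [], _ => rfl
      | [_], _ => rfl
      | [_, _], _ => rfl
      | [_, _, _], _ => rfl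
      | [_, _, _, _], _ => rfl
      | y1 :: y2 :: y3 :: y4 :: y5 :: t, hys => exact absurd rfl (hys y1 y2 y3 y4 y5 t)

-- ===== VERDICT (by name: the statement is the Claim_ definition above) =====
theorem grabParametersnew_spec : Claim_equal_grabParametersnew := by
  intro x _
  unfold Spec_grabParametersnew grabParametersnew grabParametersnew_alt
  rw [pvChunks5_eq_map]
  have hdiv : PySem.Int.truncdiv (PySem.List.len x) 5 = ((x.length / 5 : Nat) : Int) := by
    simp [PySem.Int.truncdiv, PySem.List.len_eq]
  simp only [hdiv]
  rw [PySem.List.pyRange_zero_natCast]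
  rw [List.foldl_map]
  rw [PySem.Dict.items_foldl_insert_fresh (List.range (x.length / 5))
        (fun (a : Nat) => (a : Int)) _ PySem.Dict.empty
        (by intro a _; simp [pysem])
        ((List.nodup_range).map (fun a b h => by exact_mod_cast h))]
  simp only [PySem.Dict.empty, List.nil_append, List.map_map]
  apply List.map_congr_left
  intro j _
  have c0 : (0 + 5 * (j : Int)) = ((5 * j : Nat) : Int) := by push_cast; ring
  have c1 : (1 + 5 * (j : Int)) = ((5 * j + 1 : Nat) : Int) := by push_cast; ring
  have c2 : (2 + 5 * (j : Int)) = ((5 * j + 2 : Nat) : Int) := by push_cast; ring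
  have c3 : (3 + 5 * (j : Int)) = ((5 * j + 3 : Nat) : Int) := by push_cast; ring
  have c4 : (4 + 5 * (j : Int)) = ((5 * j + 4 : Nat) : Int) := by push_cast; ring
  simp only [Function.comp, c0, c1, c2, c3, c4, PySem.List.pyGetD_natCast]
  refine Prod.ext (by simp) ?_
  simp [pvRow, PySem.Dict.insert]
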